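-- pv_equiv track=rewrite | github.com/hariharan077/sebi-orders-rag | app/sebi_orders_rag/web_fallback/ranking.py | _matched_allowed_domain_rank
-- ===== SOURCE A (Python) =====
-- def _matched_allowed_domain_rank(
--     domain: str,
--     allowed_domains: tuple[str, ...],
-- ) -> tuple[int, int] | None:
--     normalized_domain = (domain or "").lower().removeprefix("www.")
--     matches: list[tuple[int, int]] = []
--     for index, allowed in enumerate(allowed_domains):
--         normalized_allowed = allowed.lower().removeprefix("www.")
--         if (
--             normalized_domain == normalized_allowed
--             or normalized_domain.endswith(f".{normalized_allowed}")
--         ):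
--             specificity = -len(normalized_allowed.split("."))
--             matches.append((index, specificity))
--     if not matches:
--         return None
--     return min(matches)
-- ===== SOURCE B (Python) =====
-- def _matched_allowed_domain_rank(
--     domain: str,
--     allowed_domains: tuple[str, ...],
-- ) -> tuple[int, int] | None:
--     # Single pass, early return: the first matching allowed domain has the
--     # smallest index, which lexicographically dominates min over (index, spec).
--     normalized_domain = (domain or "").lower().removeprefix("www.")
--     for index, allowed in enumerate(allowed_domains):
--         normalized_allowed = allowed.lower().removeprefix("www.")
--         if (
--             normalized_domain == normalized_allowed
--             or normalized_domain.endswith(f".{normalized_allowed}")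
--         ):
--             return (index, -len(normalized_allowed.split(".")))
--     return None
-- ===== Notes on version B (the rewrite author's own statement) =====
-- stated objective: simpler
-- what changed: Instead of collecting all matches into a list and taking min over (index, specificity) tuples, B returns immediately on the first matching allowed domain (the min is always the first match since indices are unique and increasing), building no list and taking no min.
import Mathlib
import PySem

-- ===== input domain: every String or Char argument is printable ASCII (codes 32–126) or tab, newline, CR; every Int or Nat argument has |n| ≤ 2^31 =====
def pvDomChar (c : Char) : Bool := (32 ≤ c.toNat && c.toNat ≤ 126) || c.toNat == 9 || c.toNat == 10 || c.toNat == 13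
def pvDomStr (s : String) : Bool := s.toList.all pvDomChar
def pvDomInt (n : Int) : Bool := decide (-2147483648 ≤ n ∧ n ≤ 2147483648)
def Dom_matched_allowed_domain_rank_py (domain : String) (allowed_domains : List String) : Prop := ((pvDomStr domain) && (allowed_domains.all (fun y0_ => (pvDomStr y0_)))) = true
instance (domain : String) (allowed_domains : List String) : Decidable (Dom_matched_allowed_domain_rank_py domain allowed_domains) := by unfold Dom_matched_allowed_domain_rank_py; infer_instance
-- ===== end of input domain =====

-- B replaces A's collect-all-matches-then-min pass by a single early-return scan:
-- the first match has the smallest index, which lexicographically dominates the min. (objective: simpler)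

-- shared normalization / test helpers (identical subexpressions of both Pythons)
-- s.removeprefix("www."): drop the prefix iff it is present (exact port of str.removeprefix)
def pvStripWWW (cs : List Char) : List Char :=
  if cs.take 4 = "www.".toList then cs.drop 4 else cs

-- x.lower().removeprefix("www.")
def pvNorm (cs : List Char) : List Char := pvStripWWW (PySem.Chars.lower cs)

-- the if-condition: equality or endswith("." + normalized_allowed)
def pvCond (nd na : List Char) : Bool := nd == na || PySem.Chars.endswith nd ('.' :: na)

-- specificity = -len(normalized_allowed.split("."))
def pvSpec (na : List Char) : Int := -((PySem.Chars.splitOn na ['.']).length : Int)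

-- ===== PORT A =====
def matched_allowed_domain_rank_py (domain : String) (allowed_domains : List String) : Option (Int × Int) :=
  let nd := pvNorm (if domain.toList = [] then [] else domain.toList)   -- (domain or "")
  let ms := (PySem.List.enumerate allowed_domains).foldl
    (fun acc pr =>
      let na := pvNorm pr.2.toList
      if pvCond nd na then acc ++ [(pr.1, pvSpec na)] else acc) []
  if ms = [] then none else PySem.List.min2? ms (·.1) (·.2)

-- ===== PORT B =====
def pvFirstMatch (nd : List Char) : List String → Int → Option (Int × Int)
  | [], _ => none
  | a :: rest, i =>
    let na := pvNorm a.toList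
    if pvCond nd na then some (i, pvSpec na) else pvFirstMatch nd rest (i + 1)

def matched_allowed_domain_rank_py_alt (domain : String) (allowed_domains : List String) : Option (Int × Int) :=
  pvFirstMatch (pvNorm (if domain.toList = [] then [] else domain.toList)) allowed_domains 0

-- ===== PRECONDITION & SPEC =====
def Spec_matched_allowed_domain_rank_py (domain : String) (allowed_domains : List String) (out : Option (Int × Int)) : Prop := out = matched_allowed_domain_rank_py_alt domain allowed_domains
instance (domain : String) (allowed_domains : List String) (out : Option (Int × Int)) : Decidable (Spec_matched_allowed_domain_rank_py domain allowed_domains out) := by unfold Spec_matched_allowed_domain_rank_py; infer_instance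

-- ===== CLAIM (what is proved, stated in full; the proofs are below) =====
def Claim_equal_matched_allowed_domain_rank_py : Prop := ∀ (domain : String) (allowed_domains : List String), Dom_matched_allowed_domain_rank_py domain allowed_domains → Spec_matched_allowed_domain_rank_py domain allowed_domains (matched_allowed_domain_rank_py domain allowed_domains)

-- ===== LEMMAS AND PROOFS =====

-- every index produced by enumerate with start s is ≥ s
theorem pv_enum_fst_ge {α : Type} (xs : List α) (s : Int) :
    ∀ y ∈ PySem.List.enumerate xs s, s ≤ y.1 := by
  intro y hy
  have : y.1 ∈ (PySem.List.enumerate xs s).map (·.1) := List.mem_map_of_mem hy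
  rw [PySem.List.map_fst_enumerate] at this
  exact (PySem.List.mem_pyRange_one.mp this).1

-- min2? of a list whose head strictly precedes every tail element in the first key is the head
theorem pv_min2_head (x : Int × Int) (l : List (Int × Int))
    (h : ∀ y ∈ l, x.1 < y.1) :
    PySem.List.min2? (x :: l) (·.1) (·.2) = some x := by
  unfold PySem.List.min2?
  simp only [List.foldl_cons]
  induction l with
  | nil => rfl
  | cons y t ih =>
    have hy := h y (List.mem_cons_self)
    simp only [List.foldl_cons]
    rw [if_neg (by simp [not_lt.mpr (le_of_lt hy), hy])]
    exact ih (fun z hz => h z (List.mem_cons_of_mem _ hz))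

-- A's loop body, with the append-if fold turned into filter+map
theorem pv_matches_eq (nd : List Char) (al : List String) (s : Int) :
    (PySem.List.enumerate al s).foldl
      (fun acc pr =>
        let na := pvNorm pr.2.toList
        if pvCond nd na then acc ++ [(pr.1, pvSpec na)] else acc) [] =
    ((PySem.List.enumerate al s).filter (fun pr => pvCond nd (pvNorm pr.2.toList))).map
      (fun pr => (pr.1, pvSpec (pvNorm pr.2.toList))) := by
  simpa using PySem.List.foldl_append_if
    (fun pr => pvCond nd (pvNorm pr.2.toList))
    (fun pr => (pr.1, pvSpec (pvNorm pr.2.toList)))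
    (PySem.List.enumerate al s) []

-- core equivalence, generalized over the start index
theorem pv_core (nd : List Char) (al : List String) (s : Int) :
    (if ((PySem.List.enumerate al s).filter (fun pr => pvCond nd (pvNorm pr.2.toList))).map
          (fun pr => (pr.1, pvSpec (pvNorm pr.2.toList))) = [] then none
     else PySem.List.min2?
       (((PySem.List.enumerate al s).filter (fun pr => pvCond nd (pvNorm pr.2.toList))).map
          (fun pr => (pr.1, pvSpec (pvNorm pr.2.toList)))) (·.1) (·.2)) =
    pvFirstMatch nd al s := by
  induction al generalizing s with
  | nil => rfl
  | cons a rest ih =>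
    simp only [PySem.List.enumerate_cons, List.filter_cons]
    by_cases hc : pvCond nd (pvNorm a.toList)
    · simp only [hc, if_pos, List.map_cons]
      have hgt : ∀ y ∈ (((PySem.List.enumerate rest (s+1)).filter
            (fun pr => pvCond nd (pvNorm pr.2.toList))).map
            (fun pr => (pr.1, pvSpec (pvNorm pr.2.toList)))),
          ((s, a).1, pvSpec (pvNorm a.toList)).1 < y.1 := by
        intro y hy
        obtain ⟨pr, hpr, rfl⟩ := List.mem_map.mp hy
        have := pv_enum_fst_ge rest (s+1) pr (List.mem_of_mem_filter hpr)
        simpa using lt_of_lt_of_le (by omega : s < s + 1) this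
      rw [if_neg (by simp)]
      rw [pv_min2_head _ _ hgt]
      simp [pvFirstMatch, hc]
    · simp only [hc, Bool.false_eq_true, not_false_eq_true, if_neg]
      rw [show pvFirstMatch nd (a :: rest) s = pvFirstMatch nd rest (s+1) by
        simp [pvFirstMatch, hc]]
      exact ih (s+1)

-- ===== VERDICT (by name: the statement is the Claim_ definition above) =====
theorem matched_allowed_domain_rank_py_spec : Claim_equal_matched_allowed_domain_rank_py := by
  intro domain allowed_domains _
  unfold Spec_matched_allowed_domain_rank_py matched_allowed_domain_rank_py matched_allowed_domain_rank_py_alt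
  simp only []
  rw [pv_matches_eq]
  exact pv_core _ allowed_domains 0
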